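-- pv_equiv track=rewrite | github.com/asmit404/GFG_Solutions | Remove the balls.py | finLength
-- ===== SOURCE A (Python) =====
-- from typing import List
--
-- def finLength(N: int, color: List[int], radius: List[int]) -> int:
--     stack = []
--     stack.append((color[0], radius[0]))
--     for i in range(1, len(color)):
--         tmp = (color[i], radius[i])
--         if len(stack) and stack[-1] == tmp:
--             stack.pop()
--         else:
--             stack.append(tmp)
--     return len(stack)
-- ===== SOURCE B (Python) =====
-- def finLength(N, color, radius):
--     # Divide and conquer: reduce each half fully, then cancel matching
--     # pairs across the boundary of the two reduced halves.
--     pairs = list(zip(color, radius))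
--
--     def merge(left, right):
--         i = len(left)
--         j = 0
--         while i > 0 and j < len(right) and left[i - 1] == right[j]:
--             i -= 1
--             j += 1
--         return left[:i] + right[j:]
--
--     def reduce(lo, hi):
--         if hi - lo <= 1:
--             return pairs[lo:hi]
--         mid = (lo + hi) // 2
--         return merge(reduce(lo, mid), reduce(mid, hi))
--
--     return len(reduce(0, len(pairs)))
-- ===== Notes on version B (the rewrite author's own statement) =====
-- stated objective: alternative
-- what changed: A's single left-to-right stack pass is replaced by a divide-and-conquer reduction: zip the two lists, recursively reduce each half, and cancel equal adjacent pairs across the boundary of the two reduced halves; the results agree by confluence of adjacent-pair cancellation.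
import Mathlib
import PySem

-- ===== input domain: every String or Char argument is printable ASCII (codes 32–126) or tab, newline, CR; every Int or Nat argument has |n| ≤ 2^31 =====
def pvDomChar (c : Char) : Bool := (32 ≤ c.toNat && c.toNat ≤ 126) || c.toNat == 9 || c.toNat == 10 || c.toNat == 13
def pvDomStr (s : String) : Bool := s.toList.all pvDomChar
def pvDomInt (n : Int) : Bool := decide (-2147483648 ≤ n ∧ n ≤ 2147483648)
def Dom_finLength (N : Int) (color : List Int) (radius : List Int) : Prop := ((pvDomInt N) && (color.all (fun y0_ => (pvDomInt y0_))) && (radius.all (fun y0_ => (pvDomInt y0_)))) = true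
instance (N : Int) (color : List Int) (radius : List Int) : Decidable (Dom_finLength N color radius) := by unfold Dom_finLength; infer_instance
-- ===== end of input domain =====

-- B replaces A's single left-to-right stack pass by a divide-and-conquer reduction
-- (reduce each half, then cancel equal pairs across the boundary); the results agree
-- on Pre_ because adjacent-pair cancellation is confluent, which is proved below.

-- ===== PORT A =====
def finLength (N : Int) (color : List Int) (radius : List Int) : Int :=
  -- stack = []; stack.append((color[0], radius[0]))
  let stack : List (Int × Int) := [] ++ [(PySem.List.pyGetD color 0 0, PySem.List.pyGetD radius 0 0)]
  -- for i in range(1, len(color)): …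
  let stack := (PySem.List.pyRange 1 (color.length : Int) 1).foldl (fun st i =>
      let tmp : Int × Int := (PySem.List.pyGetD color i 0, PySem.List.pyGetD radius i 0)
      if st.length ≠ 0 ∧ PySem.List.pyGet? st (-1) = some tmp then
        st.dropLast                    -- stack.pop()
      else
        st ++ [tmp]) stack             -- stack.append(tmp)
  (stack.length : Int)

-- ===== PORT B =====
-- the merge loop: while i > 0 and j < len(right) and left[i-1] == right[j]: i -= 1; j += 1
-- then: return left[:i] + right[j:]
def pvMerge (l r : List (Int × Int)) : List (Int × Int) :=
  match r with
  | [] => l ++ r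
  | b :: rt => if l.getLast? = some b then pvMerge l.dropLast rt else l ++ r
termination_by r.length

-- reduce(lo, hi): a slice of length ≤ 1, or the merge of the two recursive halves
def pvReduce (pairs : List (Int × Int)) (lo hi : Int) : List (Int × Int) :=
  if hi - lo ≤ 1 then PySem.List.slice pairs (some lo) (some hi)
  else
    let mid := PySem.Int.floordiv (lo + hi) 2
    pvMerge (pvReduce pairs lo mid) (pvReduce pairs mid hi)
termination_by (hi - lo).toNat
decreasing_by
  · have h := PySem.Int.floordiv_eq_ediv_of_pos (a := lo + hi) (b := 2) (by omega)
    simp only [h]; omega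
  · have h := PySem.Int.floordiv_eq_ediv_of_pos (a := lo + hi) (b := 2) (by omega)
    simp only [h]; omega

def finLength_alt (N : Int) (color : List Int) (radius : List Int) : Int :=
  let pairs := color.zip radius
  ((pvReduce pairs 0 (pairs.length : Int)).length : Int)

-- ===== PRECONDITION & SPEC =====
-- Pre_ excludes exactly the inputs where A raises IndexError: empty color
-- (color[0]) or radius shorter than color (radius[i] for some i < len(color)).
def Pre_finLength (N : Int) (color : List Int) (radius : List Int) : Prop :=
  color ≠ [] ∧ color.length ≤ radius.length
instance (N : Int) (color : List Int) (radius : List Int) : Decidable (Pre_finLength N color radius) := by unfold Pre_finLength; infer_instance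

def pvWitness_finLength : Int × List Int × List Int := (2, [1, 2], [3, 3])

def Spec_finLength (N : Int) (color : List Int) (radius : List Int) (out : Int) : Prop := out = finLength_alt N color radius
instance (N : Int) (color : List Int) (radius : List Int) (out : Int) : Decidable (Spec_finLength N color radius out) := by unfold Spec_finLength; infer_instance

-- ===== CLAIM (what is proved, stated in full; the proofs are below) =====
def Claim_equal_finLength : Prop := ∀ (N : Int) (color : List Int) (radius : List Int), Dom_finLength N color radius → Pre_finLength N color radius → Spec_finLength N color radius (finLength N color radius)

-- ===== LEMMAS AND PROOFS =====

-- the one-element cancellation step (prepend x, cancelling against the head)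
def pvCancel (x : Int × Int) (r : List (Int × Int)) : List (Int × Int) :=
  match r with
  | [] => [x]
  | y :: t => if y = x then t else x :: y :: t

-- the fully reduced form of a list (right fold of pvCancel)
def pvRed (xs : List (Int × Int)) : List (Int × Int) := xs.foldr pvCancel []

-- A's stack step
def pvStep (st : List (Int × Int)) (x : Int × Int) : List (Int × Int) :=
  if st.getLast? = some x then st.dropLast else st ++ [x]

-- a list is reduced iff no two adjacent elements are equal
def pvReduced (l : List (Int × Int)) : Prop := l.IsChain (fun a b => a ≠ b)

theorem pvCancel_cases (x : Int × Int) (r : List (Int × Int)) :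
    (∃ t, r = x :: t ∧ pvCancel x r = t) ∨ pvCancel x r = x :: r := by
  match r with
  | [] => right; rfl
  | y :: t =>
    by_cases h : y = x
    · subst h; left; exact ⟨t, rfl, by simp [pvCancel]⟩
    · right; simp [pvCancel, h]

theorem pvReduced_cancel (x : Int × Int) (r : List (Int × Int)) (h : pvReduced r) :
    pvReduced (pvCancel x r) := by
  unfold pvReduced at *
  match r with
  | [] => exact List.IsChain.singleton x
  | y :: t =>
    by_cases hyx : y = x
    · simpa [pvCancel, hyx] using ((List.isChain_cons).mp h).2
    · have he : pvCancel x (y :: t) = x :: y :: t := by simp [pvCancel, hyx]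
      rw [he, List.isChain_cons_cons]
      exact ⟨fun e => hyx e.symm, h⟩

theorem pvReduced_foldr (l : List (Int × Int)) (r : List (Int × Int)) (h : pvReduced r) :
    pvReduced (l.foldr pvCancel r) := by
  induction l with
  | nil => exact h
  | cons x l ih => exact pvReduced_cancel x _ ih

theorem pvReduced_red (xs : List (Int × Int)) : pvReduced (pvRed xs) :=
  pvReduced_foldr xs [] List.IsChain.nil

theorem pvCancel_cancel (x : Int × Int) (r : List (Int × Int)) (h : pvReduced r) :
    pvCancel x (pvCancel x r) = r := by
  unfold pvReduced at h
  match r with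
  | [] => simp [pvCancel]
  | y :: t =>
    by_cases hyx : y = x
    · subst hyx
      match t with
      | [] => simp [pvCancel]
      | z :: t' =>
        have hyz : y ≠ z := ((List.isChain_cons_cons).mp h).1
        simp [pvCancel, hyz.symm]
    · simp [pvCancel, hyx]

theorem pvStep_cons (d x : Int × Int) (l : List (Int × Int)) (hl : l ≠ []) :
    pvStep (d :: l) x = d :: pvStep l x := by
  match l with
  | e :: l'' =>
    by_cases h : (e :: l'').getLast? = some x
    · simp [pvStep, h]
    · simp [pvStep, h]

-- pvCancel at the front commutes with the stack step at the back
theorem pvCancel_step (y x : Int × Int) (st : List (Int × Int)) :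
    pvCancel y (pvStep st x) = pvStep (pvCancel y st) x := by
  match st with
  | [] =>
    by_cases h : x = y
    · subst h; simp [pvStep, pvCancel]
    · have h' : ¬ y = x := fun e => h e.symm
      simp [pvStep, pvCancel, h, h']
  | [c] =>
    by_cases hcx : c = x <;> by_cases hcy : c = y
    · subst hcx; subst hcy; simp [pvStep, pvCancel]
    · subst hcx; simp [pvStep, pvCancel, hcy]
    · subst hcy; simp [pvStep, pvCancel, hcx]
    · simp [pvStep, pvCancel, hcx, hcy]
  | c :: e :: st'' =>
    have hl : (e :: st'') ≠ [] := by simp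
    rw [pvStep_cons c x _ hl]
    by_cases hcy : c = y
    · simp [pvCancel, hcy]
    · have h1 : pvCancel y (c :: pvStep (e :: st'') x) = y :: c :: pvStep (e :: st'') x := by
        simp [pvCancel, hcy]
      have h2 : pvCancel y (c :: e :: st'') = y :: c :: e :: st'' := by simp [pvCancel, hcy]
      rw [h1, h2, pvStep_cons y x _ (by simp), pvStep_cons c x _ hl]

theorem pvRed_concat (xs : List (Int × Int)) (x : Int × Int) :
    pvRed (xs ++ [x]) = pvStep (pvRed xs) x := by
  induction xs with
  | nil => simp [pvRed, pvStep, pvCancel]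
  | cons y ys ih =>
    show pvCancel y (pvRed (ys ++ [x])) = pvStep (pvCancel y (pvRed ys)) x
    rw [ih, pvCancel_step]

-- A's whole stack pass computes the reduced form
theorem pvFoldl_step (xs : List (Int × Int)) :
    xs.foldl pvStep [] = pvRed xs := by
  induction xs using List.reverseRecOn with
  | nil => rfl
  | append_singleton ys x ih =>
    rw [List.foldl_append, pvRed_concat, ← ih]
    rfl

-- folding pvCancel over the reduced form is folding it over the list itself
theorem pvFoldr_red (xs r : List (Int × Int)) (h : pvReduced r) :
    (pvRed xs).foldr pvCancel r = xs.foldr pvCancel r := by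
  induction xs with
  | nil => rfl
  | cons x xs ih =>
    show (pvCancel x (pvRed xs)).foldr pvCancel r = pvCancel x (xs.foldr pvCancel r)
    rcases pvCancel_cases x (pvRed xs) with ⟨t, ht, he⟩ | he
    · rw [he, ← ih, ht]
      show t.foldr pvCancel r = pvCancel x (pvCancel x (t.foldr pvCancel r))
      rw [pvCancel_cancel x _ (pvReduced_foldr t r h)]
    · rw [he]
      show pvCancel x ((pvRed xs).foldr pvCancel r) = pvCancel x (xs.foldr pvCancel r)
      rw [ih]

-- no cancellation happens when the concatenation is already reduced
theorem pvFoldr_no_cancel (l s : List (Int × Int)) (h : pvReduced (l ++ s)) :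
    l.foldr pvCancel s = l ++ s := by
  induction l with
  | nil => rfl
  | cons x l ih =>
    have h' : pvReduced (l ++ s) := ((List.isChain_cons).mp h).2
    show pvCancel x (l.foldr pvCancel s) = x :: (l ++ s)
    rw [ih h']
    match hls : l ++ s with
    | [] => rfl
    | c :: w =>
      have hxc : x ≠ c := by
        have h1 := ((List.isChain_cons).mp h).1
        exact h1 c (by simp [hls])
      simp [pvCancel, hxc.symm]

theorem pvMerge_eq_foldr (l r : List (Int × Int)) (hl : pvReduced l) (hr : pvReduced r) :
    pvMerge l r = l.foldr pvCancel r := by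
  induction r generalizing l with
  | nil =>
    rw [pvMerge]
    exact (pvFoldr_no_cancel l [] (by simpa using hl)).symm
  | cons b rt ih =>
    rw [pvMerge]
    by_cases hlast : l.getLast? = some b
    · rw [if_pos hlast]
      have hlne : l ≠ [] := by intro e; simp [e] at hlast
      have hdec : l.dropLast ++ [b] = l := by
        have h2 := List.dropLast_concat_getLast hlne
        rwa [(List.getLast?_eq_some_getLast hlne).symm.trans hlast |> Option.some.inj] at h2
      have hld : pvReduced l.dropLast := by
        unfold pvReduced at hl ⊢
        rw [← hdec] at hl
        exact (List.isChain_append.mp hl).1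
      have hrt : pvReduced rt := ((List.isChain_cons).mp hr).2
      rw [ih l.dropLast hld hrt, ← hdec, List.foldr_append]
      simp [pvCancel]
    · rw [if_neg hlast]
      refine (pvFoldr_no_cancel l (b :: rt) ?_).symm
      unfold pvReduced
      rw [List.isChain_append]
      refine ⟨hl, hr, ?_⟩
      intro x hx y hy
      simp at hy
      subst hy
      intro e; subst e
      exact hlast hx

theorem pvMerge_red (xs ys : List (Int × Int)) :
    pvMerge (pvRed xs) (pvRed ys) = pvRed (xs ++ ys) := by
  rw [pvMerge_eq_foldr _ _ (pvReduced_red xs) (pvReduced_red ys),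
      pvFoldr_red xs _ (pvReduced_red ys)]
  simp [pvRed, List.foldr_append]

theorem pvRed_short (l : List (Int × Int)) (h : l.length ≤ 1) : pvRed l = l := by
  match l with
  | [] => rfl
  | [x] => simp [pvRed, pvCancel]
  | x :: y :: t => simp at h

theorem pvSlice_split (xs : List (Int × Int)) (lo mid hi : Int)
    (h0 : 0 ≤ lo) (h1 : lo ≤ mid) (h2 : mid ≤ hi) :
    PySem.List.slice xs (some lo) (some mid) ++ PySem.List.slice xs (some mid) (some hi)
      = PySem.List.slice xs (some lo) (some hi) := by
  rw [PySem.List.slice_toNat _ h0 (by omega), PySem.List.slice_toNat _ (by omega) (by omega),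
      PySem.List.slice_toNat _ h0 (by omega)]
  have hmid : xs.drop mid.toNat = (xs.drop lo.toNat).drop (mid.toNat - lo.toNat) := by
    rw [List.drop_drop]
    congr 1
    omega
  rw [hmid, ← List.take_add]
  congr 1
  omega

theorem pvReduce_spec (pairs : List (Int × Int)) (lo hi : Int) :
    0 ≤ lo → lo ≤ hi →
    pvReduce pairs lo hi = pvRed (PySem.List.slice pairs (some lo) (some hi)) := by
  fun_induction pvReduce pairs lo hi with
  | case1 lo hi hle =>
    intro h0 h1
    refine (pvRed_short _ ?_).symm
    rw [PySem.List.slice_toNat _ h0 (by omega)]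
    have := List.length_take_le (hi.toNat - lo.toNat) (pairs.drop lo.toNat)
    have : (List.take (hi.toNat - lo.toNat) (pairs.drop lo.toNat)).length ≤ hi.toNat - lo.toNat :=
      List.length_take_le _ _
    omega
  | case2 lo hi hgt mid ih1 ih2 =>
    intro h0 h1
    have hmid := PySem.Int.floordiv_eq_ediv_of_pos (a := lo + hi) (b := 2) (by omega)
    have hb1 : lo ≤ PySem.Int.floordiv (lo + hi) 2 := by rw [hmid]; omega
    have hb2 : PySem.Int.floordiv (lo + hi) 2 ≤ hi := by rw [hmid]; omega
    rw [ih1 h0 hb1, ih2 (by omega) hb2, pvMerge_red,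
        pvSlice_split pairs lo _ hi h0 hb1 hb2]

-- A's branch condition is the stack step
theorem pvStepA (st : List (Int × Int)) (x : Int × Int) :
    (if st.length ≠ 0 ∧ PySem.List.pyGet? st (-1) = some x then st.dropLast else st ++ [x])
      = pvStep st x := by
  rw [PySem.List.pyGet?_neg_one]
  match st with
  | [] => simp [pvStep]
  | y :: t => simp [pvStep]

-- the loop's indexing produces the tail of the zipped pairs
theorem pvMap_range (color radius : List Int) (hlen : color.length ≤ radius.length) :
    (PySem.List.pyRange 1 (color.length : Int) 1).map
        (fun i => ((PySem.List.pyGetD color i 0, PySem.List.pyGetD radius i 0) : Int × Int))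
      = (color.zip radius).tail := by
  apply List.ext_getElem
  · simp [PySem.List.length_pyRange_one]
    omega
  · intro k hk1 hk2
    simp only [List.getElem_map, PySem.List.getElem_pyRange_one]
    rw [List.getElem_tail]
    have hkc : k + 1 < color.length := by
      simp [PySem.List.length_pyRange_one] at hk1
      omega
    have hkr : k + 1 < radius.length := by omega
    have hcast : (1 : Int) + (k : Int) = ((k + 1 : Nat) : Int) := by push_cast; ring
    rw [hcast, PySem.List.pyGetD_natCast, PySem.List.pyGetD_natCast,
        List.getD_eq_getElem _ _ hkc, List.getD_eq_getElem _ _ hkr, List.getElem_zip]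

-- ===== VERDICT (by name: the statement is the Claim_ definition above) =====
theorem finLength_spec : Claim_equal_finLength := by
  intro N color radius _ hpre
  rcases hpre with ⟨hne, hlen⟩
  unfold Spec_finLength finLength finLength_alt
  dsimp only
  have hplen : (color.zip radius).length = color.length := by
    simp [List.length_zip]
    omega
  -- B's side
  rw [pvReduce_spec _ 0 _ le_rfl (by positivity),
      PySem.List.slice_toNat _ le_rfl (by positivity)]
  simp only [Int.toNat_zero, Int.toNat_natCast, List.drop_zero, Nat.sub_zero, List.take_length]
  -- A's side
  have hbody : (fun (st : List (Int × Int)) (i : Int) =>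
      if st.length ≠ 0 ∧ PySem.List.pyGet? st (-1) =
          some ((PySem.List.pyGetD color i 0, PySem.List.pyGetD radius i 0) : Int × Int)
        then st.dropLast
        else st ++ [((PySem.List.pyGetD color i 0, PySem.List.pyGetD radius i 0) : Int × Int)])
      = fun st i => pvStep st ((PySem.List.pyGetD color i 0, PySem.List.pyGetD radius i 0) : Int × Int) := by
    funext st i
    exact pvStepA st _
  simp only [hbody]
  rw [← List.foldl_map, pvMap_range color radius hlen]
  -- assemble the full fold over the zipped pairs
  obtain ⟨p, rest, hpr⟩ : ∃ p rest, color.zip radius = p :: rest := by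
    cases hz : color.zip radius with
    | nil =>
      rw [hz] at hplen
      cases color with
      | nil => exact absurd rfl hne
      | cons a l => simp at hplen
    | cons p rest => exact ⟨p, rest, rfl⟩
  have h0c : 0 < color.length := by
    cases color with
    | nil => exact absurd rfl hne
    | cons a l => simp
  have h0r : 0 < radius.length := by omega
  have h0z : 0 < (color.zip radius).length := by omega
  have hp0 : ((PySem.List.pyGetD color 0 0, PySem.List.pyGetD radius 0 0) : Int × Int) = p := by
    have hz : (color.zip radius)[0]'h0z = p := by simp [hpr]
    have hg := List.getElem_zip (l := color) (l' := radius) (i := 0) (h := h0z)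
    rw [PySem.List.pyGetD_zero, PySem.List.pyGetD_zero,
        List.getD_eq_getElem _ _ h0c, List.getD_eq_getElem _ _ h0r]
    rw [← hg]
    exact hz
  rw [hpr]
  simp only [List.tail_cons, List.nil_append]
  have hstep0 : [p] = pvStep [] p := by simp [pvStep]
  rw [hp0, hstep0, ← List.foldl_cons, ← hpr, pvFoldl_step]
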